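-- pv_equiv track=rewrite | github.com/gta191977649/Project-Outlier-Music | task/chap_5/pattern_anlyze.py | find_cadence_patterns
-- ===== SOURCE A (Python) =====
-- def find_cadence_patterns(main_signal, cadence_pattern, min_preceding_chords=2, allow_repetitions=True):
--     """
--     Find multiple occurrences of a cadence pattern in the main signal using exact matching,
--     with an option to allow or disallow repetitive chords.
--
--     Parameters:
--     - main_signal: The main chord progression signal (list of numbers)
--     - cadence_pattern: The cadence pattern to search for (list of numbers)
--     - min_preceding_chords: Minimum number of chords required before the cadence pattern (default: 2)
--     - allow_repetitions: Whether to allow repetitive chords in the progression (default: True)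
--
--     Returns:
--     - A list of tuples, each containing (start_index, end_index) of found patterns
--     """
--     pattern_length = len(cadence_pattern)
--     matches = []
--
--     for i in range(min_preceding_chords, len(main_signal) - pattern_length + 1):
--         # Check if the cadence pattern matches exactly
--         if main_signal[i:i + pattern_length] == cadence_pattern:
--             # Check if there are enough preceding chords
--             if i >= min_preceding_chords:
--                 # If repetitions are not allowed, check for unique chords
--                 if not allow_repetitions:
--                     progression = main_signal[i - min_preceding_chords:i + pattern_length]
--                     if len(set(progression)) == len(progression):
--                         matches.append((i - min_preceding_chords, i + pattern_length))
--                 else: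
--                     matches.append((i - min_preceding_chords, i + pattern_length))
--
--     return matches
-- ===== SOURCE B (Python) =====
-- def find_cadence_patterns(main_signal, cadence_pattern, min_preceding_chords=2, allow_repetitions=True):
--     n = len(main_signal)
--     m = len(cadence_pattern)
--     k = min_preceding_chords
--     # pattern-major search: start from all candidate positions and successively
--     # filter them by one pattern element at a time
--     cand = list(range(k, n - m + 1))
--     for j, c in enumerate(cadence_pattern):
--         if not cand:
--             break
--         cand = [i for i in cand if main_signal[i + j] == c]
--     out = []
--     for i in cand:
--         if not allow_repetitions:
--             window = main_signal[i - k:i + m]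
--             if len(set(window)) != len(window):
--                 continue
--         out.append((i - k, i + m))
--     return out
-- ===== Notes on version B (the rewrite author's own statement) =====
-- stated objective: alternative
-- what changed: B replaces A's position-major scan (slice out a window at every start and compare it to the whole pattern) by a pattern-major candidate-filtering search: it starts from the list of all candidate start positions and, for each pattern element in turn, keeps only the candidates that agree at that offset (stopping early when none survive), then applies the preceding-chord/uniqueness filter to the surviving positions.
-- outside the precondition, e.g. on find_cadence_patterns([1, 2, 1, 2], [1, 2], -2, True): A returns [(2, 2), (4, 4)], B returns [(0, 0), (2, 2), (4, 4)]; on find_cadence_patterns([0, 1, 2], [2], -1, False): A returns [(3, 3)], B returns [(0, 0), (3, 3)]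
import Mathlib
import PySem

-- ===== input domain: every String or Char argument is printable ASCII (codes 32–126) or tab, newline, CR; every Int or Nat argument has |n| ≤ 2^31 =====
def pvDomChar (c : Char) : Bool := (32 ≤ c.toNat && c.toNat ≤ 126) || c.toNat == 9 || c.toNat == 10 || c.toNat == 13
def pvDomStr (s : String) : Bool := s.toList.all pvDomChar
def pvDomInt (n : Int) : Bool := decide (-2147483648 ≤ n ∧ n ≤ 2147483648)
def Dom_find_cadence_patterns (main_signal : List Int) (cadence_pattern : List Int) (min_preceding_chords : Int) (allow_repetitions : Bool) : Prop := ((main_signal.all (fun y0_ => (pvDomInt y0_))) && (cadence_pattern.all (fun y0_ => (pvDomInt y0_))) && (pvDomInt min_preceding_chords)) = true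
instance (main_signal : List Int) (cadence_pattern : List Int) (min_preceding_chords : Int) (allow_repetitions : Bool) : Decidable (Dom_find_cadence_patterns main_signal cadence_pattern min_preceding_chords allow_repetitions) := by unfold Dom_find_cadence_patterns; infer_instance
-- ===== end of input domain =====

-- B replaces A's position-major slice-and-compare scan by a pattern-major candidate-filtering
-- search (same cost class; objective: alternative algorithm, same results).


-- ===== PORT A =====
def find_cadence_patterns (main_signal : List Int) (cadence_pattern : List Int) (min_preceding_chords : Int) (allow_repetitions : Bool) : List (Int × Int) :=
  let pattern_length : Int := PySem.List.len cadence_pattern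
  (PySem.List.pyRange min_preceding_chords
      (PySem.List.len main_signal - pattern_length + 1) 1).foldl
    (fun acc i =>
      if PySem.List.slice main_signal (some i) (some (i + pattern_length)) = cadence_pattern then
        if min_preceding_chords ≤ i then
          if !allow_repetitions then
            let progression := PySem.List.slice main_signal
              (some (i - min_preceding_chords)) (some (i + pattern_length))
            if PySem.List.len (PySem.Set.ofList progression) = PySem.List.len progression then
              acc ++ [(i - min_preceding_chords, i + pattern_length)]
            else acc
          else acc ++ [(i - min_preceding_chords, i + pattern_length)]
        else acc
      else acc) []

-- ===== PORT B =====
-- B-side helper: the 'for j, c in enumerate(cadence_pattern)' candidate-filtering loop of Source B.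
-- main_signal[i + j] is ported with pyGet?; 'none' (Python IndexError) is treated as a mismatch,
-- which can only occur outside Pre_ (negative min_preceding_chords).
def pvCandFilter (main_signal : List Int) (cadence_pattern : List Int) (cand : List Int) : List Int :=
  (PySem.List.enumerate cadence_pattern 0).foldl
    (fun cand jc =>
      if cand = [] then cand
      else cand.filter (fun i => PySem.List.pyGet? main_signal (i + jc.1) == some jc.2)) cand

def find_cadence_patterns_alt (main_signal : List Int) (cadence_pattern : List Int) (min_preceding_chords : Int) (allow_repetitions : Bool) : List (Int × Int) :=
  let n : Int := PySem.List.len main_signal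
  let m : Int := PySem.List.len cadence_pattern
  let k : Int := min_preceding_chords
  let cand := pvCandFilter main_signal cadence_pattern (PySem.List.pyRange k (n - m + 1) 1)
  cand.foldl
    (fun out i =>
      if !allow_repetitions then
        let window := PySem.List.slice main_signal (some (i - k)) (some (i + m))
        if PySem.List.len (PySem.Set.ofList window) ≠ PySem.List.len window then out
        else out ++ [(i - k, i + m)]
      else out ++ [(i - k, i + m)]) []

-- ===== PRECONDITION & SPEC =====
-- Pre_ restricts to the task's natural domain of non-negative min_preceding_chords; a negative
-- chord count is meaningless for "minimum number of preceding chords" and A's matches there are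
-- an accident of Python's negative-index slicing.
def Pre_find_cadence_patterns (main_signal : List Int) (cadence_pattern : List Int) (min_preceding_chords : Int) (allow_repetitions : Bool) : Prop :=
  0 ≤ min_preceding_chords
instance (main_signal : List Int) (cadence_pattern : List Int) (min_preceding_chords : Int) (allow_repetitions : Bool) : Decidable (Pre_find_cadence_patterns main_signal cadence_pattern min_preceding_chords allow_repetitions) := by unfold Pre_find_cadence_patterns; infer_instance

def pvWitness_find_cadence_patterns : List Int × List Int × Int × Bool := ([1, 2, 3, 1, 2], [1, 2], 2, true)

def Spec_find_cadence_patterns (main_signal : List Int) (cadence_pattern : List Int) (min_preceding_chords : Int) (allow_repetitions : Bool) (out : List (Int × Int)) : Prop := out = find_cadence_patterns_alt main_signal cadence_pattern min_preceding_chords allow_repetitions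
instance (main_signal : List Int) (cadence_pattern : List Int) (min_preceding_chords : Int) (allow_repetitions : Bool) (out : List (Int × Int)) : Decidable (Spec_find_cadence_patterns main_signal cadence_pattern min_preceding_chords allow_repetitions out) := by unfold Spec_find_cadence_patterns; infer_instance

-- ===== CLAIM (what is proved, stated in full; the proofs are below) =====
def Claim_equal_find_cadence_patterns : Prop := ∀ (main_signal : List Int) (cadence_pattern : List Int) (min_preceding_chords : Int) (allow_repetitions : Bool), Dom_find_cadence_patterns main_signal cadence_pattern min_preceding_chords allow_repetitions → Pre_find_cadence_patterns main_signal cadence_pattern min_preceding_chords allow_repetitions → Spec_find_cadence_patterns main_signal cadence_pattern min_preceding_chords allow_repetitions (find_cadence_patterns main_signal cadence_pattern min_preceding_chords allow_repetitions)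

-- ===== LEMMAS AND PROOFS =====

-- the candidate-filtering loop is a filter by "the pattern matches element-wise at i"
lemma pvCandFilter_eq (ms : List Int) (cp : List Int) (s : Int) (cand : List Int) :
    (PySem.List.enumerate cp s).foldl
      (fun cand jc =>
        if cand = [] then cand
        else cand.filter (fun i => PySem.List.pyGet? ms (i + jc.1) == some jc.2)) cand
    = cand.filter
        (fun i => (PySem.List.enumerate cp s).all
          (fun jc => PySem.List.pyGet? ms (i + jc.1) == some jc.2)) := by
  induction cp generalizing s cand with
  | nil => simp [PySem.List.enumerate_nil]
  | cons c cp ih =>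
    rw [PySem.List.enumerate_cons]
    simp only [List.foldl_cons, List.all_cons]
    by_cases h : cand = []
    · subst h; simp [ih]
    · rw [if_neg h, ih, List.filter_filter]
      exact List.filter_congr (fun x _ => Bool.and_comm _ _)

-- element-wise match characterises "the slice equals the pattern"
lemma slice_eq_iff_all (ms cp : List Int) (i : Int) (hi : 0 ≤ i)
    (hle : i + (cp.length : Int) ≤ (ms.length : Int)) :
    (PySem.List.slice ms (some i) (some (i + (cp.length : Int))) = cp) ↔
    ((PySem.List.enumerate cp 0).all
      (fun jc => PySem.List.pyGet? ms (i + jc.1) == some jc.2) = true) := by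
  have hsl : PySem.List.slice ms (some i) (some (i + (cp.length : Int))) =
      (ms.drop i.toNat).take ((i + (cp.length : Int)).toNat - i.toNat) := by
    apply PySem.List.slice_toNat <;> omega
  rw [hsl]
  have htn : (i + (cp.length : Int)).toNat - i.toNat = cp.length := by omega
  rw [htn, List.all_eq_true]
  constructor
  · intro hEq jc hjc
    obtain ⟨kk, hk, rfl⟩ := (PySem.List.mem_enumerate_iff _ _ _).1 hjc
    simp only [beq_iff_eq]
    have hik : i + ((0 : Int) + kk) = ((i.toNat + kk : Nat) : Int) := by omega
    rw [hik, PySem.List.pyGet?_natCast]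
    have hlt : i.toNat + kk < ms.length := by omega
    rw [List.getElem?_eq_getElem hlt]
    have h2 : kk < ((ms.drop i.toNat).take cp.length).length := by
      rw [List.length_take, List.length_drop]; omega
    have h3 : ((ms.drop i.toNat).take cp.length)[kk]'h2 = cp[kk]'hk :=
      List.getElem_of_eq hEq h2
    rw [List.getElem_take, List.getElem_drop] at h3
    rw [← h3]
  · intro hall
    apply List.ext_getElem
    · rw [List.length_take, List.length_drop]; omega
    · intro kk h1 h2
      have hk' : kk < cp.length := h2
      have hmem : ((0 : Int) + kk, cp[kk]'hk') ∈ PySem.List.enumerate cp 0 :=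
        (PySem.List.mem_enumerate_iff _ _ _).2 ⟨kk, hk', rfl⟩
      have hthis := hall _ hmem
      simp only [beq_iff_eq] at hthis
      have hik : i + ((0 : Int) + kk) = ((i.toNat + kk : Nat) : Int) := by omega
      rw [hik, PySem.List.pyGet?_natCast] at hthis
      have hlt : i.toNat + kk < ms.length := by omega
      rw [List.getElem?_eq_getElem hlt] at hthis
      rw [List.getElem_take, List.getElem_drop]
      exact Option.some.inj hthis

-- A as filter-then-map over the candidate range
lemma A_eq (ms cp : List Int) (k : Int) (ar : Bool) :
    find_cadence_patterns ms cp k ar =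
    ((PySem.List.pyRange k ((ms.length : Int) - (cp.length : Int) + 1) 1).filter
        (fun i => decide (PySem.List.slice ms (some i) (some (i + (cp.length : Int))) = cp ∧
          k ≤ i ∧ (ar = true ∨
            ((PySem.Set.ofList (PySem.List.slice ms (some (i - k)) (some (i + (cp.length : Int))))).length : Int) =
            ((PySem.List.slice ms (some (i - k)) (some (i + (cp.length : Int)))).length : Int))))).map
      (fun i => (i - k, i + (cp.length : Int))) := by
  unfold find_cadence_patterns
  simp only [PySem.List.len_eq]
  have hfold :
      (PySem.List.pyRange k ((ms.length : Int) - (cp.length : Int) + 1) 1).foldl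
        (fun acc i =>
          if PySem.List.slice ms (some i) (some (i + (cp.length : Int))) = cp then
            if k ≤ i then
              if (!ar) = true then
                if ((PySem.Set.ofList (PySem.List.slice ms (some (i - k)) (some (i + (cp.length : Int))))).length : Int) =
                    ((PySem.List.slice ms (some (i - k)) (some (i + (cp.length : Int)))).length : Int) then
                  acc ++ [(i - k, i + (cp.length : Int))]
                else acc
              else acc ++ [(i - k, i + (cp.length : Int))]
            else acc
          else acc) []
      = (PySem.List.pyRange k ((ms.length : Int) - (cp.length : Int) + 1) 1).foldl
        (fun acc i =>
          if (PySem.List.slice ms (some i) (some (i + (cp.length : Int))) = cp ∧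
              k ≤ i ∧ (ar = true ∨
                ((PySem.Set.ofList (PySem.List.slice ms (some (i - k)) (some (i + (cp.length : Int))))).length : Int) =
                ((PySem.List.slice ms (some (i - k)) (some (i + (cp.length : Int)))).length : Int)))
          then acc ++ [(i - k, i + (cp.length : Int))] else acc) [] :=
    PySem.List.foldl_congr_mem' _ _ _ _ (fun i _ acc => by
      cases ar <;> split_ifs <;> simp_all)
  rw [hfold, PySem.List.foldl_append_ite]
  simp

-- B as filter-then-map over the same range
lemma B_eq (ms cp : List Int) (k : Int) (ar : Bool) :
    find_cadence_patterns_alt ms cp k ar =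
    (((PySem.List.pyRange k ((ms.length : Int) - (cp.length : Int) + 1) 1).filter
        (fun i => (PySem.List.enumerate cp 0).all
          (fun jc => PySem.List.pyGet? ms (i + jc.1) == some jc.2))).filter
        (fun i => decide (ar = true ∨
          ((PySem.Set.ofList (PySem.List.slice ms (some (i - k)) (some (i + (cp.length : Int))))).length : Int) =
          ((PySem.List.slice ms (some (i - k)) (some (i + (cp.length : Int)))).length : Int)))).map
      (fun i => (i - k, i + (cp.length : Int))) := by
  unfold find_cadence_patterns_alt pvCandFilter
  simp only [PySem.List.len_eq]
  rw [pvCandFilter_eq]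
  have hfold :
      ((PySem.List.pyRange k ((ms.length : Int) - (cp.length : Int) + 1) 1).filter
        (fun i => (PySem.List.enumerate cp 0).all
          (fun jc => PySem.List.pyGet? ms (i + jc.1) == some jc.2))).foldl
        (fun out i =>
          if (!ar) = true then
            if ((PySem.Set.ofList (PySem.List.slice ms (some (i - k)) (some (i + (cp.length : Int))))).length : Int) ≠
                ((PySem.List.slice ms (some (i - k)) (some (i + (cp.length : Int)))).length : Int) then
              out
            else out ++ [(i - k, i + (cp.length : Int))]
          else out ++ [(i - k, i + (cp.length : Int))]) []
      = ((PySem.List.pyRange k ((ms.length : Int) - (cp.length : Int) + 1) 1).filter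
        (fun i => (PySem.List.enumerate cp 0).all
          (fun jc => PySem.List.pyGet? ms (i + jc.1) == some jc.2))).foldl
        (fun out i =>
          if (ar = true ∨
              ((PySem.Set.ofList (PySem.List.slice ms (some (i - k)) (some (i + (cp.length : Int))))).length : Int) =
              ((PySem.List.slice ms (some (i - k)) (some (i + (cp.length : Int)))).length : Int))
          then out ++ [(i - k, i + (cp.length : Int))] else out) [] :=
    PySem.List.foldl_congr_mem' _ _ _ _ (fun i _ out => by
      cases ar <;> split_ifs <;> simp_all)
  rw [hfold, PySem.List.foldl_append_ite]
  simp

-- ===== VERDICT (by name: the statement is the Claim_ definition above) =====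
theorem find_cadence_patterns_spec : Claim_equal_find_cadence_patterns := by
  intro ms cp k ar _hDom hPre
  have hPre' : (0 : Int) ≤ k := hPre
  unfold Spec_find_cadence_patterns
  rw [A_eq, B_eq, List.filter_filter]
  congr 1
  apply List.filter_congr
  intro x hx
  obtain ⟨hx1, hx2⟩ := (PySem.List.mem_pyRange_one ..).1 hx
  have hP := slice_eq_iff_all ms cp x (by omega) (by omega)
  by_cases hs : PySem.List.slice ms (some x) (some (x + (cp.length : Int))) = cp
  · have hMA := hP.1 hs
    simp [hs, hx1, hMA]
  · have hMA : ((PySem.List.enumerate cp 0).all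
        (fun jc => PySem.List.pyGet? ms (x + jc.1) == some jc.2)) = false := by
      rw [Bool.eq_false_iff]
      intro hc
      exact hs (hP.2 hc)
    simp [hs, hMA]
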